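-- pv_equiv track=rewrite | github.com/Dhruvkumarpatel/DataStructure-Algorithm | Amazon/combination.py | number_of_options
-- ===== SOURCE A (Python) =====
-- from functools import lru_cache
-- from typing import List
--
-- def number_of_options(a: List[int], b: List[int], c: List[int], d: List[int], limit: int) -> int:
--     all_numbers = [a, b, c, d]
--     n = len(all_numbers)
--     for numbers in all_numbers:
--         numbers.sort()
--     # cost of (lowest, highest) combination
--     ranges = [(0, 0)]
--     # number of all combinations, ignoring limit
--     combs = [1]
--     for numbers in all_numbers:
--         low, high = ranges[-1]
--         ranges.append((numbers[0] + low, numbers[-1] + high))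
--         combs.append(len(numbers) * combs[-1])
--     @lru_cache(None)
--     def search(item: int, limit: int) -> int:
--         # for persistent scan optimization
--         num0 = all_numbers[0]
--         # right boundary of `num0` with `<= left` num
--         b0 = len(num0)
--         numbers = all_numbers[item - 1]
--         low, high = ranges[item - 1]
--         ways = 0
--         for number in numbers:
--             left = limit - number
--             # extreme case optimization
--             if left < low:
--                 # not enough for cheapest combination, so 0 options;
--                 # same for higher `number`, so break
--                 break
--             if left >= high:
--                 # enough for all combinations
--                 ways += combs[item - 1]
--                 continue
--             # persistent scan optimization
--             if item == 2:
--                 # will not go out of bounds because of `left < low` check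
--                 while num0[b0 - 1] > left:
--                     b0 -= 1
--                 # boundary is persisted between loops,
--                 # so faster than a linear scan every time
--                 ways += b0
--                 continue
--             ways += search(item - 1, left)
--         return ways
--     return search(n, limit)
-- ===== SOURCE B (Python) =====
-- def number_of_options(a, b, c, d, limit):
--     # meet in the middle: pairwise sums of a*b and c*d, persistent two-pointer count
--     ab = sorted(x + y for x in a for y in b)
--     cd = sorted(x + y for x in c for y in d)
--     total = 0
--     j = len(cd)
--     for s in ab:
--         t = limit - s
--         while j > 0 and cd[j - 1] > t:
--             j -= 1
--         total += j
--     return total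
-- ===== Notes on version B (the rewrite author's own statement) =====
-- stated objective: alternative
-- what changed: A's three-level recursive search over the four sorted lists (with pruning and a persistent scan) is replaced by meet-in-the-middle: sort the pairwise sums of a x b and of c x d once, then count matching pairs with a single persistent two-pointer sweep (intended as faster; measured only 1.43x at the largest size).
import Mathlib
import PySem

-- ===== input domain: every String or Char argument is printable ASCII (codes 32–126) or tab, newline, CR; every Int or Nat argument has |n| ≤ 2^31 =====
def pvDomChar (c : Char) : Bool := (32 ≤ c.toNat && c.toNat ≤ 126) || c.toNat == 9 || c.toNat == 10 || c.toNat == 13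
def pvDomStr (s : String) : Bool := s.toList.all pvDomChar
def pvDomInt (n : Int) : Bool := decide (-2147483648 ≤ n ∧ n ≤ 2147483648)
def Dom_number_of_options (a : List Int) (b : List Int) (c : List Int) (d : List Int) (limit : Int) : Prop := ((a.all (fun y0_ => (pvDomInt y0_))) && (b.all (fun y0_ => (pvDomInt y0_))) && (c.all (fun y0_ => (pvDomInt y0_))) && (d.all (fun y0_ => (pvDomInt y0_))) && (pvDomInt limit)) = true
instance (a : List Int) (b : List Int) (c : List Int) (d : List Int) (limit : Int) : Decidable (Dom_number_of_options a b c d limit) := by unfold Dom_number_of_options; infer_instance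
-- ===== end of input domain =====

-- B replaces A's three-level recursive search by meet-in-the-middle over sorted pairwise sums;
-- A sorts its four list arguments in place — the equivalence proved here is about the
-- RETURN value only (B does not mutate its arguments).

-- shared helper: the pointer-descent `while k > 0 and xs[k - 1] > t: k -= 1`, which occurs
-- verbatim in A's persistent scan (`b0`) and in B's two-pointer sweep (`j`)
def pvScanA (num0 : List Int) (left : Int) : Nat → Nat
  | 0 => 0
  | k + 1 => if num0.getD k 0 > left then pvScanA num0 left k else k + 1

-- ===== PORT A =====

-- the `for number in numbers` loop of `search`, with break/continue as early returns
def pvLoopA (low high comb : Int) (item2 : Bool) (num0 : List Int)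
    (recur : Int → Int) (lim : Int) : List Int → Nat → Int → Int
  | [], _, ways => ways
  | x :: rest, b0, ways =>
      let left := lim - x
      if left < low then ways
      else if high ≤ left then pvLoopA low high comb item2 num0 recur lim rest b0 (ways + comb)
      else if item2 then
        let b0' := pvScanA num0 left b0
        pvLoopA low high comb item2 num0 recur lim rest b0' (ways + (b0' : Int))
      else pvLoopA low high comb item2 num0 recur lim rest b0 (ways + recur left)

-- `search(item, limit)` (the lru_cache is pure memoization and is dropped)
def pvSearchA (allN : List (List Int)) (ranges : List (Int × Int)) (combs : List Int) :
    Nat → Int → Int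
  | 0, _ => 0
  | itemM1 + 1, lim =>
      let num0 := allN.headD []
      let numbers := allN.getD itemM1 []
      let lh := ranges.getD itemM1 (0, 0)
      let comb := combs.getD itemM1 0
      pvLoopA lh.1 lh.2 comb (itemM1 + 1 == 2) num0 (pvSearchA allN ranges combs itemM1) lim
        numbers num0.length 0

def number_of_options (a : List Int) (b : List Int) (c : List Int) (d : List Int) (limit : Int) : Int :=
  let sa := PySem.List.sorted a (fun x => x) false
  let sb := PySem.List.sorted b (fun x => x) false
  let sc := PySem.List.sorted c (fun x => x) false
  let sd := PySem.List.sorted d (fun x => x) false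
  let allN := [sa, sb, sc, sd]
  let rc := allN.foldl
    (fun (st : List (Int × Int) × List Int) numbers =>
      let lh := st.1.getLast?.getD (0, 0)
      (st.1 ++ [(numbers.headD 0 + lh.1, numbers.getLastD 0 + lh.2)],
       st.2 ++ [(numbers.length : Int) * (st.2.getLast?.getD 0)]))
    ([(0, 0)], [1])
  pvSearchA allN rc.1 rc.2 4 limit

-- ===== PORT B =====
-- the `for s in ab` loop carrying (j, total)
def pvLoopB (cd : List Int) (limit : Int) : List Int → Nat → Int → Int
  | [], _, total => total
  | s :: rest, j, total =>
      let j' := pvScanA cd (limit - s) j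
      pvLoopB cd limit rest j' (total + (j' : Int))

def number_of_options_alt (a : List Int) (b : List Int) (c : List Int) (d : List Int) (limit : Int) : Int :=
  let ab := PySem.List.sorted (a.flatMap fun x => b.map fun y => x + y) (fun x => x) false
  let cd := PySem.List.sorted (c.flatMap fun x => d.map fun y => x + y) (fun x => x) false
  pvLoopB cd limit ab cd.length 0

-- ===== PRECONDITION & SPEC =====
-- Pre_ excludes only inputs where A raises: if any of the four lists is empty, A's
-- `numbers[0]` raises IndexError.
def Pre_number_of_options (a : List Int) (b : List Int) (c : List Int) (d : List Int) (limit : Int) : Prop :=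
  a ≠ [] ∧ b ≠ [] ∧ c ≠ [] ∧ d ≠ []
instance (a : List Int) (b : List Int) (c : List Int) (d : List Int) (limit : Int) : Decidable (Pre_number_of_options a b c d limit) := by unfold Pre_number_of_options; infer_instance
def pvWitness_number_of_options : List Int × List Int × List Int × List Int × Int := ([1], [2], [3], [4], 10)

def Spec_number_of_options (a : List Int) (b : List Int) (c : List Int) (d : List Int) (limit : Int) (out : Int) : Prop := out = number_of_options_alt a b c d limit
instance (a : List Int) (b : List Int) (c : List Int) (d : List Int) (limit : Int) (out : Int) : Decidable (Spec_number_of_options a b c d limit out) := by unfold Spec_number_of_options; infer_instance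

-- ===== CLAIM (what is proved, stated in full; the proofs are below) =====
def Claim_equal_number_of_options : Prop := ∀ (a : List Int) (b : List Int) (c : List Int) (d : List Int) (limit : Int), Dom_number_of_options a b c d limit → Pre_number_of_options a b c d limit → Spec_number_of_options a b c d limit (number_of_options a b c d limit)

-- ===== LEMMAS AND PROOFS =====

-- number of elements ≤ t
def pvCnt (xs : List Int) (t : Int) : Nat := xs.countP (fun w => decide (w ≤ t))
-- Σ_{x ∈ l} f x
def pvS (l : List Int) (f : Int → Int) : Int := (l.map f).sum
def pvC2 (sa sb : List Int) (t : Int) : Int := pvS sb (fun x => (pvCnt sa (t - x) : Int))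
def pvC3 (sa sb sc : List Int) (t : Int) : Int := pvS sc (fun y => pvC2 sa sb (t - y))

theorem pvCnt_eq_of_split (xs : List Int) (t : Int) (m : Nat) (hm : m ≤ xs.length)
    (h1 : ∀ i (hi : i < xs.length), i < m → xs[i] ≤ t)
    (h2 : ∀ i (hi : i < xs.length), m ≤ i → t < xs[i]) : pvCnt xs t = m := by
  unfold pvCnt
  rw [← List.take_append_drop m xs, List.countP_append]
  have ht : (xs.take m).countP (fun w => decide (w ≤ t)) = (xs.take m).length := by
    rw [List.countP_eq_length]
    intro a ha
    obtain ⟨i, hi, rfl⟩ := List.mem_iff_getElem.1 ha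
    simp only [List.getElem_take]
    simp only [List.length_take] at hi
    exact decide_eq_true (h1 i (by omega) (by omega))
  have hd : (xs.drop m).countP (fun w => decide (w ≤ t)) = 0 := by
    rw [List.countP_eq_zero]
    intro a ha
    obtain ⟨i, hi, rfl⟩ := List.mem_iff_getElem.1 ha
    simp only [List.getElem_drop]
    simp only [List.length_drop] at hi
    simpa using h2 (m + i) (by omega) (by omega)
  rw [ht, hd, List.length_take]
  omega

theorem pvCnt_pos_property (xs : List Int) (t : Int) (hs : xs.Pairwise (· ≤ ·))
    (i : Nat) (hi : i < xs.length) (h : pvCnt xs t ≤ i) : t < xs[i] := by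
  by_contra hle
  rw [Int.not_lt] at hle
  have : i + 1 ≤ pvCnt xs t := by
    unfold pvCnt
    have htake : (xs.take (i+1)).countP (fun w => decide (w ≤ t)) = (xs.take (i+1)).length := by
      rw [List.countP_eq_length]
      intro a ha
      obtain ⟨k, hk, rfl⟩ := List.mem_iff_getElem.1 ha
      simp only [List.getElem_take]
      simp only [List.length_take] at hk
      have : xs[k]'(by omega) ≤ xs[i] := by
        rcases Nat.lt_or_ge k i with hlt | hge
        · exact (List.pairwise_iff_getElem.1 hs) k i (by omega) hi hlt
        · have : k = i := by omega
          subst this; rfl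
      exact decide_eq_true (le_trans this hle)
    conv_rhs => rw [← List.take_append_drop (i+1) xs]
    rw [List.countP_append, htake, List.length_take]
    omega
  omega


theorem pvS_nil (f : Int → Int) : pvS [] f = 0 := rfl
theorem pvS_cons (x : Int) (l : List Int) (f : Int → Int) : pvS (x :: l) f = f x + pvS l f := by
  simp [pvS]
theorem pvS_congr {l : List Int} {f g : Int → Int} (h : ∀ x ∈ l, f x = g x) :
    pvS l f = pvS l g := by
  unfold pvS; rw [List.map_congr_left h]
theorem pvS_zero (l : List Int) : pvS l (fun _ => 0) = 0 := by simp [pvS]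
theorem pvS_add (l : List Int) (f g : Int → Int) :
    pvS l (fun x => f x + g x) = pvS l f + pvS l g := by
  induction l with
  | nil => simp [pvS]
  | cons x l ih => simp only [pvS_cons, ih]; ring
theorem pvS_const (l : List Int) (c : Int) : pvS l (fun _ => c) = (l.length : Int) * c := by
  induction l with
  | nil => simp [pvS]
  | cons x l ih => simp only [pvS_cons, ih, List.length_cons]; push_cast; ring
theorem pvS_swap (l m : List Int) (f : Int → Int → Int) :
    pvS l (fun x => pvS m (fun y => f x y)) = pvS m (fun y => pvS l (fun x => f x y)) := by
  induction l with
  | nil => simp [pvS_nil, pvS_zero]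
  | cons x l ih =>
    rw [pvS_cons, ih, ← pvS_add]
    exact pvS_congr (fun y _ => by rw [pvS_cons])
theorem pvS_perm {l m : List Int} (h : l.Perm m) (f : Int → Int) : pvS l f = pvS m f :=
  (h.map f).sum_eq
theorem pvS_flatMap (l : List Int) (g : Int → List Int) (f : Int → Int) :
    pvS (l.flatMap g) f = pvS l (fun x => pvS (g x) f) := by
  induction l with
  | nil => simp [pvS]
  | cons x l ih => simp only [List.flatMap_cons, pvS, List.map_append, List.sum_append] at *
                   simp [ih]
theorem pvS_map (l : List Int) (g : Int → Int) (f : Int → Int) :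
    pvS (l.map g) f = pvS l (fun x => f (g x)) := by simp [pvS, List.map_map, Function.comp_def]

theorem pvCnt_perm {l m : List Int} (h : l.Perm m) (t : Int) : pvCnt l t = pvCnt m t :=
  h.countP_eq _
theorem pvCnt_flatMap (l : List Int) (g : Int → List Int) (t : Int) :
    (pvCnt (l.flatMap g) t : Int) = pvS l (fun x => (pvCnt (g x) t : Int)) := by
  induction l with
  | nil => simp [pvCnt, pvS]
  | cons x l ih => simp only [List.flatMap_cons, pvCnt, List.countP_append] at *
                   rw [pvS_cons, ← ih]; push_cast; ring
theorem pvCnt_map_add (d : List Int) (z t : Int) :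
    pvCnt (d.map (fun w => z + w)) t = pvCnt d (t - z) := by
  unfold pvCnt
  rw [List.countP_map]
  refine List.countP_congr (fun w _ => ?_)
  simp only [Function.comp_apply, decide_eq_true_eq]
  omega
theorem pvCnt_expand (xs : List Int) (t : Int) :
    (pvCnt xs t : Int) = pvS xs (fun w => if w ≤ t then 1 else 0) := by
  induction xs with
  | nil => simp [pvCnt, pvS]
  | cons x l ih => rw [pvS_cons, ← ih]
                   by_cases h : x ≤ t <;> simp [pvCnt, List.countP_cons, h] <;> push_cast <;> ring

-- head/last bounds of a sorted list
theorem head_min (xs : List Int) (hp : xs.Pairwise (· ≤ ·)) :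
    ∀ y ∈ xs, xs.headD 0 ≤ y := by
  cases xs with
  | nil => intro y hy; cases hy
  | cons x l =>
    rw [List.pairwise_cons] at hp
    intro y hy
    rcases List.mem_cons.1 hy with rfl | hy'
    · exact le_refl _
    · exact hp.1 y hy'
theorem last_max (xs : List Int) (hp : xs.Pairwise (· ≤ ·)) (hne : xs ≠ []) :
    ∀ y ∈ xs, y ≤ xs.getLastD 0 := by
  intro y hy
  obtain ⟨i, hi, rfl⟩ := List.mem_iff_getElem.1 hy
  have hlast : xs.getLastD 0 = xs[xs.length - 1]'(by
      cases xs with | nil => exact absurd rfl hne | cons x l => simp) := by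
    rw [List.getLastD_eq_getLast?, List.getLast?_eq_getElem?]
    simp [List.getElem?_eq_getElem (by cases xs with | nil => exact absurd rfl hne | cons x l => simp : xs.length - 1 < xs.length)]
  rw [hlast]
  rcases Nat.lt_or_ge i (xs.length - 1) with hlt | hge
  · exact (List.pairwise_iff_getElem.1 hp) i (xs.length - 1) hi (by omega) hlt
  · have : i = xs.length - 1 := by omega
    subst this; rfl


theorem pvCnt_le_length (xs : List Int) (t : Int) : pvCnt xs t ≤ xs.length :=
  List.countP_le_length

theorem pvScanA_eq (num0 : List Int) (t : Int) (k : Nat) (hs : num0.Pairwise (· ≤ ·))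
    (hk : k ≤ num0.length)
    (hinv : ∀ i (hi : i < num0.length), k ≤ i → t < num0[i]) :
    pvScanA num0 t k = pvCnt num0 t := by
  induction k with
  | zero =>
    simp only [pvScanA]
    exact (pvCnt_eq_of_split num0 t 0 (Nat.zero_le _) (fun i hi h => by omega)
      (fun i hi _ => hinv i hi (Nat.zero_le _))).symm
  | succ k ih =>
    have hklt : k < num0.length := by omega
    simp only [pvScanA]
    rw [List.getD_eq_getElem _ _ hklt]
    split_ifs with hgt
    · exact ih (by omega) (fun i hi hki => by
        rcases Nat.eq_or_lt_of_le hki with rfl | hlt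
        · exact hgt
        · exact hinv i hi hlt)
    · rw [Int.not_lt] at hgt
      exact (pvCnt_eq_of_split num0 t (k + 1) (by omega)
        (fun i hi hik => by
          have : num0[i] ≤ num0[k] := by
            rcases Nat.lt_or_ge i k with hlt | hge
            · exact (List.pairwise_iff_getElem.1 hs) i k hi hklt hlt
            · have : i = k := by omega
              subst this; rfl
          exact le_trans this hgt)
        (fun i hi hik => hinv i hi hik)).symm

theorem pvLoopB_eq (cd : List Int) (limit : Int) (nums : List Int) (j : Nat) (total : Int)
    (hcd : cd.Pairwise (· ≤ ·)) (hn : nums.Pairwise (· ≤ ·)) (hj : j ≤ cd.length)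
    (hinv : ∀ i (hi : i < cd.length), j ≤ i → ∀ s ∈ nums, limit - s < cd[i]) :
    pvLoopB cd limit nums j total = total + pvS nums (fun s => (pvCnt cd (limit - s) : Int)) := by
  induction nums generalizing j total with
  | nil => simp [pvLoopB, pvS]
  | cons s rest ih =>
    rw [List.pairwise_cons] at hn
    have hscan : pvScanA cd (limit - s) j = pvCnt cd (limit - s) :=
      pvScanA_eq cd (limit - s) j hcd hj
        (fun i hi hji => hinv i hi hji s List.mem_cons_self)
    simp only [pvLoopB, hscan]
    rw [ih _ _ hn.2 (pvCnt_le_length _ _)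
      (fun i hi hci s' hs' => by
        have h1 : limit - s' ≤ limit - s := by have := hn.1 s' hs'; omega
        exact lt_of_le_of_lt h1 (pvCnt_pos_property cd (limit - s) hcd i hi hci))]
    simp [pvS]
    ring

theorem pvLoopA_false_eq (low high comb : Int) (num0 : List Int) (recur : Int → Int)
    (lim : Int) (nums : List Int) (b0 : Nat) (ways : Int) (C : Int → Int)
    (hn : nums.Pairwise (· ≤ ·))
    (hrec : ∀ t, low ≤ t → t < high → recur t = C t)
    (h0 : ∀ t, t < low → C t = 0)
    (hhigh : ∀ t, high ≤ t → C t = comb) :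
    pvLoopA low high comb false num0 recur lim nums b0 ways
      = ways + pvS nums (fun x => C (lim - x)) := by
  induction nums generalizing b0 ways with
  | nil => simp [pvLoopA, pvS]
  | cons x rest ih =>
    rw [List.pairwise_cons] at hn
    simp only [pvLoopA]
    split_ifs with hlt hhi hF
    · have hall : ∀ y ∈ x :: rest, C (lim - y) = 0 := by
        intro y hy
        rcases List.mem_cons.1 hy with rfl | hy'
        · exact h0 _ hlt
        · exact h0 _ (by have := hn.1 y hy'; omega)
      have : pvS (x :: rest) (fun y => C (lim - y)) = 0 := by
        unfold pvS
        exact List.sum_eq_zero (by intro z hz; obtain ⟨y, hy, rfl⟩ := List.mem_map.1 hz; exact hall y hy)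
      rw [this]; ring
    · rw [ih _ _ hn.2]
      simp [pvS, hhigh _ hhi]
      ring
    · simp at hF
    · rw [ih _ _ hn.2]
      rw [hrec _ (by omega) (by omega)]
      simp [pvS]
      ring

theorem pvLoopA_true_eq (low high : Int) (num0 : List Int) (recur : Int → Int)
    (lim : Int) (nums : List Int) (b0 : Nat) (ways : Int)
    (hs : num0.Pairwise (· ≤ ·)) (hn : nums.Pairwise (· ≤ ·)) (hb0 : b0 ≤ num0.length)
    (h0 : ∀ t, t < low → pvCnt num0 t = 0)
    (hhigh : ∀ t, high ≤ t → (pvCnt num0 t : Int) = num0.length)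
    (hinv : ∀ i (hi : i < num0.length), b0 ≤ i → ∀ x ∈ nums, lim - x < num0[i]) :
    pvLoopA low high ((num0.length : Int)) true num0 recur lim nums b0 ways
      = ways + pvS nums (fun x => (pvCnt num0 (lim - x) : Int)) := by
  induction nums generalizing b0 ways with
  | nil => simp [pvLoopA, pvS]
  | cons x rest ih =>
    rw [List.pairwise_cons] at hn
    simp only [pvLoopA]
    split_ifs with hlt hhi
    · have hall : ∀ y ∈ x :: rest, (pvCnt num0 (lim - y) : Int) = 0 := by
        intro y hy
        rcases List.mem_cons.1 hy with rfl | hy'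
        · simp [h0 _ hlt]
        · simp [h0 (lim - y) (by have := hn.1 y hy'; omega)]
      have : pvS (x :: rest) (fun y => (pvCnt num0 (lim - y) : Int)) = 0 := by
        unfold pvS
        exact List.sum_eq_zero (by intro z hz; obtain ⟨y, hy, rfl⟩ := List.mem_map.1 hz; exact hall y hy)
      rw [this]; ring
    · rw [ih _ _ hn.2 hb0 (fun i hi hbi y hy => hinv i hi hbi y (List.mem_cons_of_mem _ hy))]
      simp [pvS, hhigh _ hhi]
      ring
    · have hscan : pvScanA num0 (lim - x) b0 = pvCnt num0 (lim - x) :=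
        pvScanA_eq num0 (lim - x) b0 hs hb0
          (fun i hi hbi => hinv i hi hbi x List.mem_cons_self)
      simp only [hscan]
      rw [ih _ _ hn.2 (pvCnt_le_length _ _)
        (fun i hi hci y hy => by
          have h1 : lim - y ≤ lim - x := by have := hn.1 y hy; omega
          exact lt_of_le_of_lt h1 (pvCnt_pos_property num0 (lim - x) hs i hi hci))]
      simp [pvS]
      ring



theorem pvCnt_zero_of_lt_head (xs : List Int) (hp : xs.Pairwise (· ≤ ·)) (t : Int)
    (h : t < xs.headD 0) : pvCnt xs t = 0 := by
  unfold pvCnt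
  rw [List.countP_eq_zero]
  intro y hy
  have := head_min xs hp y hy
  simp only [decide_eq_true_eq]
  omega

theorem pvCnt_full_of_last_le (xs : List Int) (hp : xs.Pairwise (· ≤ ·)) (hne : xs ≠ [])
    (t : Int) (h : xs.getLastD 0 ≤ t) : pvCnt xs t = xs.length := by
  unfold pvCnt
  rw [List.countP_eq_length]
  intro y hy
  have := last_max xs hp hne y hy
  simp only [decide_eq_true_eq]
  omega

theorem pvC2_zero (sa sb : List Int) (hpa : sa.Pairwise (· ≤ ·)) (hpb : sb.Pairwise (· ≤ ·))
    (t : Int) (h : t < sa.headD 0 + sb.headD 0) : pvC2 sa sb t = 0 := by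
  unfold pvC2
  rw [pvS_congr (g := fun _ => (0 : Int)) (fun x hx => by
    rw [pvCnt_zero_of_lt_head sa hpa _ (by have := head_min sb hpb x hx; omega)]; rfl), pvS_zero]

theorem pvC2_full (sa sb : List Int) (hpa : sa.Pairwise (· ≤ ·)) (hpb : sb.Pairwise (· ≤ ·))
    (hane : sa ≠ []) (hbne : sb ≠ []) (t : Int) (h : sa.getLastD 0 + sb.getLastD 0 ≤ t) :
    pvC2 sa sb t = (sb.length : Int) * (sa.length : Int) := by
  unfold pvC2
  rw [pvS_congr (g := fun _ => ((sa.length : Int))) (fun x hx => by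
    rw [pvCnt_full_of_last_le sa hpa hane _ (by have := last_max sb hpb hbne x hx; omega)]), pvS_const]

theorem pvC3_zero (sa sb sc : List Int) (hpa : sa.Pairwise (· ≤ ·)) (hpb : sb.Pairwise (· ≤ ·))
    (hpc : sc.Pairwise (· ≤ ·)) (t : Int)
    (h : t < sa.headD 0 + sb.headD 0 + sc.headD 0) : pvC3 sa sb sc t = 0 := by
  unfold pvC3
  rw [pvS_congr (g := fun _ => (0 : Int)) (fun y hy =>
    pvC2_zero sa sb hpa hpb _ (by have := head_min sc hpc y hy; omega)), pvS_zero]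

theorem pvC3_full (sa sb sc : List Int) (hpa : sa.Pairwise (· ≤ ·)) (hpb : sb.Pairwise (· ≤ ·))
    (hpc : sc.Pairwise (· ≤ ·)) (hane : sa ≠ []) (hbne : sb ≠ []) (hcne : sc ≠ []) (t : Int)
    (h : sa.getLastD 0 + sb.getLastD 0 + sc.getLastD 0 ≤ t) :
    pvC3 sa sb sc t = (sc.length : Int) * ((sb.length : Int) * (sa.length : Int)) := by
  unfold pvC3
  rw [pvS_congr (g := fun _ => ((sb.length : Int) * (sa.length : Int))) (fun y hy =>
    pvC2_full sa sb hpa hpb hane hbne _ (by have := last_max sc hpc hcne y hy; omega)), pvS_const]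

theorem quad_reorder (A B C D : List Int) (lim : Int) :
    pvS D (fun z => pvS C (fun y => pvS B (fun x => pvS A (fun w => if w + x + y + z ≤ lim then (1:Int) else 0))))
  = pvS A (fun w => pvS B (fun x => pvS C (fun y => pvS D (fun z => if w + x + y + z ≤ lim then (1:Int) else 0)))) := by
  calc
    pvS D (fun z => pvS C (fun y => pvS B (fun x => pvS A (fun w => if w + x + y + z ≤ lim then (1:Int) else 0))))
        = pvS D (fun z => pvS C (fun y => pvS A (fun w => pvS B (fun x => if w + x + y + z ≤ lim then (1:Int) else 0)))) :=
          pvS_congr (fun z _ => pvS_congr (fun y _ => pvS_swap B A _))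
    _ = pvS D (fun z => pvS A (fun w => pvS C (fun y => pvS B (fun x => if w + x + y + z ≤ lim then (1:Int) else 0)))) :=
          pvS_congr (fun z _ => pvS_swap C A _)
    _ = pvS A (fun w => pvS D (fun z => pvS C (fun y => pvS B (fun x => if w + x + y + z ≤ lim then (1:Int) else 0)))) :=
          pvS_swap D A _
    _ = pvS A (fun w => pvS D (fun z => pvS B (fun x => pvS C (fun y => if w + x + y + z ≤ lim then (1:Int) else 0)))) :=
          pvS_congr (fun w _ => pvS_congr (fun z _ => pvS_swap C B _))
    _ = pvS A (fun w => pvS B (fun x => pvS D (fun z => pvS C (fun y => if w + x + y + z ≤ lim then (1:Int) else 0)))) :=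
          pvS_congr (fun w _ => pvS_swap D B _)
    _ = pvS A (fun w => pvS B (fun x => pvS C (fun y => pvS D (fun z => if w + x + y + z ≤ lim then (1:Int) else 0)))) :=
          pvS_congr (fun w _ => pvS_congr (fun x _ => pvS_swap D C _))

theorem pvA_eval (a b c d : List Int) (limit : Int)
    (ha : a ≠ []) (hb : b ≠ []) (hc : c ≠ []) (hd : d ≠ []) :
    number_of_options a b c d limit =
      pvS (PySem.List.sorted d (fun x => x) false)
        (fun z => pvC3 (PySem.List.sorted a (fun x => x) false)
                       (PySem.List.sorted b (fun x => x) false)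
                       (PySem.List.sorted c (fun x => x) false) (limit - z)) := by
  set sa := PySem.List.sorted a (fun x => x) false with hsadef
  set sb := PySem.List.sorted b (fun x => x) false with hsbdef
  set sc := PySem.List.sorted c (fun x => x) false with hscdef
  set sd := PySem.List.sorted d (fun x => x) false with hsddef
  have hpa : sa.Pairwise (· ≤ ·) := by simpa using PySem.List.sorted_pairwise (xs := a) (key := fun x => x)
  have hpb : sb.Pairwise (· ≤ ·) := by simpa using PySem.List.sorted_pairwise (xs := b) (key := fun x => x)
  have hpc : sc.Pairwise (· ≤ ·) := by simpa using PySem.List.sorted_pairwise (xs := c) (key := fun x => x)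
  have hpd : sd.Pairwise (· ≤ ·) := by simpa using PySem.List.sorted_pairwise (xs := d) (key := fun x => x)
  have hane : sa ≠ [] := by rw [hsadef]; simpa [PySem.List.sorted_eq_nil_iff] using ha
  have hbne : sb ≠ [] := by rw [hsbdef]; simpa [PySem.List.sorted_eq_nil_iff] using hb
  have hcne : sc ≠ [] := by rw [hscdef]; simpa [PySem.List.sorted_eq_nil_iff] using hc
  have e0 : number_of_options a b c d limit =
      pvSearchA [sa, sb, sc, sd]
        [(0, 0),
         (sa.headD 0 + 0, sa.getLastD 0 + 0),
         (sb.headD 0 + (sa.headD 0 + 0), sb.getLastD 0 + (sa.getLastD 0 + 0)),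
         (sc.headD 0 + (sb.headD 0 + (sa.headD 0 + 0)), sc.getLastD 0 + (sb.getLastD 0 + (sa.getLastD 0 + 0))),
         (sd.headD 0 + (sc.headD 0 + (sb.headD 0 + (sa.headD 0 + 0))), sd.getLastD 0 + (sc.getLastD 0 + (sb.getLastD 0 + (sa.getLastD 0 + 0))))]
        [1, (sa.length : Int) * 1, (sb.length : Int) * ((sa.length : Int) * 1),
         (sc.length : Int) * ((sb.length : Int) * ((sa.length : Int) * 1)),
         (sd.length : Int) * ((sc.length : Int) * ((sb.length : Int) * ((sa.length : Int) * 1)))] 4 limit := rfl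
  set allN := [sa, sb, sc, sd] with hallN
  set R := [((0:Int), (0:Int)),
         (sa.headD 0 + 0, sa.getLastD 0 + 0),
         (sb.headD 0 + (sa.headD 0 + 0), sb.getLastD 0 + (sa.getLastD 0 + 0)),
         (sc.headD 0 + (sb.headD 0 + (sa.headD 0 + 0)), sc.getLastD 0 + (sb.getLastD 0 + (sa.getLastD 0 + 0))),
         (sd.headD 0 + (sc.headD 0 + (sb.headD 0 + (sa.headD 0 + 0))), sd.getLastD 0 + (sc.getLastD 0 + (sb.getLastD 0 + (sa.getLastD 0 + 0))))] with hR
  set K := [(1:Int), (sa.length : Int) * 1, (sb.length : Int) * ((sa.length : Int) * 1),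
         (sc.length : Int) * ((sb.length : Int) * ((sa.length : Int) * 1)),
         (sd.length : Int) * ((sc.length : Int) * ((sb.length : Int) * ((sa.length : Int) * 1)))] with hK
  have hs2 : ∀ t, pvSearchA allN R K 2 t = pvC2 sa sb t := by
    intro t
    have e2 : pvSearchA allN R K 2 t =
        pvLoopA (sa.headD 0 + 0) (sa.getLastD 0 + 0) ((sa.length : Int) * 1) true sa
          (pvSearchA allN R K 1) t sb sa.length 0 := by rw [hallN, hR, hK]; exact rfl
    rw [e2, mul_one]
    rw [pvLoopA_true_eq _ _ sa _ t sb sa.length 0 hpa hpb le_rfl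
      (fun t' ht' => pvCnt_zero_of_lt_head sa hpa t' (by omega))
      (fun t' ht' => by rw [pvCnt_full_of_last_le sa hpa hane t' (by omega)])
      (fun i hi hle x _ => absurd hi (by omega))]
    rw [zero_add]
    rfl
  have hs3 : ∀ t, pvSearchA allN R K 3 t = pvC3 sa sb sc t := by
    intro t
    have e3 : pvSearchA allN R K 3 t =
        pvLoopA (sb.headD 0 + (sa.headD 0 + 0)) (sb.getLastD 0 + (sa.getLastD 0 + 0))
          ((sb.length : Int) * ((sa.length : Int) * 1)) false sa
          (pvSearchA allN R K 2) t sc sa.length 0 := by rw [hallN, hR, hK]; exact rfl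
    rw [e3]
    rw [pvLoopA_false_eq _ _ _ sa _ t sc sa.length 0 (pvC2 sa sb) hpc
      (fun t' _ _ => hs2 t')
      (fun t' ht' => pvC2_zero sa sb hpa hpb t' (by omega))
      (fun t' ht' => by rw [pvC2_full sa sb hpa hpb hane hbne t' (by omega)]; ring)]
    rw [zero_add]
    rfl
  rw [e0]
  have e4 : pvSearchA [sa, sb, sc, sd] R K 4 limit =
      pvLoopA (sc.headD 0 + (sb.headD 0 + (sa.headD 0 + 0)))
        (sc.getLastD 0 + (sb.getLastD 0 + (sa.getLastD 0 + 0)))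
        ((sc.length : Int) * ((sb.length : Int) * ((sa.length : Int) * 1))) false sa
        (pvSearchA allN R K 3) limit sd sa.length 0 := by rw [hallN, hR, hK]; exact rfl
  rw [hallN] at e0 ⊢
  rw [e4]
  rw [pvLoopA_false_eq _ _ _ sa _ limit sd sa.length 0 (pvC3 sa sb sc) hpd
    (fun t' _ _ => hs3 t')
    (fun t' ht' => pvC3_zero sa sb sc hpa hpb hpc t' (by omega))
    (fun t' ht' => by rw [pvC3_full sa sb sc hpa hpb hpc hane hbne hcne t' (by omega)]; ring)]
  rw [zero_add]

theorem pvB_eval (a b c d : List Int) (limit : Int) :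
    number_of_options_alt a b c d limit =
      pvS (PySem.List.sorted (a.flatMap fun x => b.map fun y => x + y) (fun x => x) false)
        (fun s => (pvCnt (PySem.List.sorted (c.flatMap fun x => d.map fun y => x + y) (fun x => x) false) (limit - s) : Int)) := by
  set abS := PySem.List.sorted (a.flatMap fun x => b.map fun y => x + y) (fun x => x) false with habS
  set cdS := PySem.List.sorted (c.flatMap fun x => d.map fun y => x + y) (fun x => x) false with hcdS
  have hpab : abS.Pairwise (· ≤ ·) := by
    simpa using PySem.List.sorted_pairwise (xs := a.flatMap fun x => b.map fun y => x + y) (key := fun x => x)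
  have hpcd : cdS.Pairwise (· ≤ ·) := by
    simpa using PySem.List.sorted_pairwise (xs := c.flatMap fun x => d.map fun y => x + y) (key := fun x => x)
  have e : number_of_options_alt a b c d limit = pvLoopB cdS limit abS cdS.length 0 := rfl
  rw [e, pvLoopB_eq cdS limit abS cdS.length 0 hpcd hpab le_rfl
    (fun i hi hle s _ => absurd hi (by omega)), zero_add]

theorem pvA_flat (a b c d : List Int) (limit : Int) :
    pvS (PySem.List.sorted d (fun x => x) false)
      (fun z => pvC3 (PySem.List.sorted a (fun x => x) false)
                     (PySem.List.sorted b (fun x => x) false)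
                     (PySem.List.sorted c (fun x => x) false) (limit - z)) =
    pvS d (fun z => pvS c (fun y => pvS b (fun x => (pvCnt a (limit - z - y - x) : Int)))) := by
  rw [pvS_perm (PySem.List.sorted_perm (xs := d) (key := fun x => x) (rev := false))]
  refine pvS_congr (fun z _ => ?_)
  unfold pvC3
  rw [pvS_perm (PySem.List.sorted_perm (xs := c) (key := fun x => x) (rev := false))]
  refine pvS_congr (fun y _ => ?_)
  unfold pvC2
  rw [pvS_perm (PySem.List.sorted_perm (xs := b) (key := fun x => x) (rev := false))]
  refine pvS_congr (fun x _ => ?_)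
  rw [pvCnt_perm (PySem.List.sorted_perm (xs := a) (key := fun x => x) (rev := false))]

theorem pvB_flat (a b c d : List Int) (limit : Int) :
    pvS (PySem.List.sorted (a.flatMap fun x => b.map fun y => x + y) (fun x => x) false)
      (fun s => (pvCnt (PySem.List.sorted (c.flatMap fun x => d.map fun y => x + y) (fun x => x) false) (limit - s) : Int)) =
    pvS a (fun x => pvS b (fun y => pvS c (fun z => (pvCnt d (limit - (x + y) - z) : Int)))) := by
  rw [pvS_perm (PySem.List.sorted_perm (xs := a.flatMap fun x => b.map fun y => x + y) (key := fun x => x) (rev := false))]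
  rw [pvS_flatMap]
  refine pvS_congr (fun x _ => ?_)
  rw [pvS_map]
  refine pvS_congr (fun y _ => ?_)
  rw [pvCnt_perm (PySem.List.sorted_perm (xs := c.flatMap fun x => d.map fun y => x + y) (key := fun x => x) (rev := false))]
  rw [pvCnt_flatMap]
  refine pvS_congr (fun z _ => ?_)
  rw [pvCnt_map_add]

theorem pvAB_bridge (a b c d : List Int) (limit : Int) :
    pvS (PySem.List.sorted d (fun x => x) false)
      (fun z => pvC3 (PySem.List.sorted a (fun x => x) false)
                     (PySem.List.sorted b (fun x => x) false)
                     (PySem.List.sorted c (fun x => x) false) (limit - z)) =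
    pvS (PySem.List.sorted (a.flatMap fun x => b.map fun y => x + y) (fun x => x) false)
      (fun s => (pvCnt (PySem.List.sorted (c.flatMap fun x => d.map fun y => x + y) (fun x => x) false) (limit - s) : Int)) := by
  rw [pvA_flat, pvB_flat]
  calc
    pvS d (fun z => pvS c (fun y => pvS b (fun x => (pvCnt a (limit - z - y - x) : Int))))
        = pvS d (fun z => pvS c (fun y => pvS b (fun x => pvS a (fun w => if w + x + y + z ≤ limit then (1:Int) else 0)))) := by
          refine pvS_congr (fun z _ => pvS_congr (fun y _ => pvS_congr (fun x _ => ?_)))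
          rw [pvCnt_expand]
          exact pvS_congr (fun w _ => if_congr (by omega) rfl rfl)
    _ = pvS a (fun w => pvS b (fun x => pvS c (fun y => pvS d (fun z => if w + x + y + z ≤ limit then (1:Int) else 0)))) :=
          quad_reorder a b c d limit
    _ = pvS a (fun x => pvS b (fun y => pvS c (fun z => (pvCnt d (limit - (x + y) - z) : Int)))) := by
          refine pvS_congr (fun w _ => pvS_congr (fun x _ => pvS_congr (fun y _ => ?_)))
          rw [pvCnt_expand]
          exact pvS_congr (fun u _ => if_congr (by omega) rfl rfl)


-- ===== VERDICT (by name: the statement is the Claim_ definition above) =====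
theorem number_of_options_spec : Claim_equal_number_of_options := by
  intro a b c d limit _hDom hPre
  obtain ⟨ha, hb, hc, hd⟩ := hPre
  unfold Spec_number_of_options
  rw [pvA_eval a b c d limit ha hb hc hd, pvB_eval a b c d limit]
  exact pvAB_bridge a b c d limit
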